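-- pv_equiv track=rewrite | github.com/jasuzlasu/matura2021 | wega.py | szukaj_najwiecej_liter
-- ===== SOURCE A (Python) =====
-- def szukaj_najwiecej_liter(dane: list[str]) -> list[str, int]:
--     maks = 0
--     for linia in dane:
--         dlugosc = len(set(linia))
--         if dlugosc > maks:
--             maks = dlugosc
--     for linia in dane:
--         dlugosc = len(set(linia))
--         if dlugosc == maks:
--             return [linia, dlugosc]
-- ===== SOURCE B (Python) =====
-- def szukaj_najwiecej_liter(dane: list[str]) -> list[str, int]:
--     wynik = None
--     maks = 0
--     for linia in dane:
--         d = len(set(linia))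
--         if wynik is None or d > maks:
--             wynik = linia
--             maks = d
--     if wynik is None:
--         return None
--     return [wynik, maks]
-- ===== Notes on version B (the rewrite author's own statement) =====
-- stated objective: simpler
-- what changed: Replaces A's two scans (one to compute the maximum distinct-character count, one to re-count every line to find the first attaining it) by a single pass that keeps the running best line and count, recording the first line unconditionally.
-- outside the precondition, e.g. on szukaj_najwiecej_liter([]): A returns None, B returns None
import Mathlib
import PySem

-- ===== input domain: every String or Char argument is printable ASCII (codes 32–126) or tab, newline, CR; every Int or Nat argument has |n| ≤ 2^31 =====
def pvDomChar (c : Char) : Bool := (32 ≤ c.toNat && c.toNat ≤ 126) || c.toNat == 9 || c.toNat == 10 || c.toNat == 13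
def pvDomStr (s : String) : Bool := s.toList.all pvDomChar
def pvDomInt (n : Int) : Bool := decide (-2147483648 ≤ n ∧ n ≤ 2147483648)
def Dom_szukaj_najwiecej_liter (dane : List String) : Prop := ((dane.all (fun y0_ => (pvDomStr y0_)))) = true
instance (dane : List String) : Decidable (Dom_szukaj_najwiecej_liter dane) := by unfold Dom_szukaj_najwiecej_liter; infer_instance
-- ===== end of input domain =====

-- B merges A's two scans into one pass keeping the running best line and count (objective: simpler — one scan instead of two).
-- Pre_ excludes the empty list, where the Python A falls off both loops and returns None, not a [str, int] value.

-- len(set(linia)) — shared by both ports (both Pythons compute exactly this)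
def pvDist (linia : String) : Int := ((PySem.Set.ofList linia.toList).length : Int)

-- ===== PORT A =====
-- first loop of A: maks = 0; for linia in dane: if len(set(linia)) > maks: maks = ...
def pvMaksFrom (m : Int) (dane : List String) : Int :=
  dane.foldl (fun maks linia => let dlugosc := pvDist linia; if dlugosc > maks then dlugosc else maks) m

-- second loop of A: return [linia, dlugosc] on the first line with len(set(linia)) == maks
def pvFind (maks : Int) : List String → Option (String × Int)
  | [] => none
  | linia :: reszta =>
      let dlugosc := pvDist linia
      if dlugosc = maks then some (linia, dlugosc) else pvFind maks reszta

def szukaj_najwiecej_liter (dane : List String) : String × Int :=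
  (pvFind (pvMaksFrom 0 dane) dane).getD ("", 0)   -- getD unreachable under Pre_ (dane ≠ [])

-- ===== PORT B =====
def pvStep (acc : Option (String × Int)) (linia : String) : Option (String × Int) :=
  let d := pvDist linia
  match acc with
  | none => some (linia, d)
  | some (w, m) => if d > m then some (linia, d) else some (w, m)

def szukaj_najwiecej_liter_alt (dane : List String) : String × Int :=
  (dane.foldl pvStep none).getD ("", 0)   -- getD unreachable under Pre_ (dane ≠ [])

-- ===== PRECONDITION & SPEC =====
-- Pre_ excludes the empty list: there Python A returns None (falls off both loops), not a value of type list[str, int]; B returns None too.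
def Pre_szukaj_najwiecej_liter (dane : List String) : Prop := dane ≠ []
instance (dane : List String) : Decidable (Pre_szukaj_najwiecej_liter dane) := by unfold Pre_szukaj_najwiecej_liter; infer_instance
def pvWitness_szukaj_najwiecej_liter : List String := ["ala", "ma kota"]

def Spec_szukaj_najwiecej_liter (dane : List String) (out : String × Int) : Prop := out = szukaj_najwiecej_liter_alt dane
instance (dane : List String) (out : String × Int) : Decidable (Spec_szukaj_najwiecej_liter dane out) := by unfold Spec_szukaj_najwiecej_liter; infer_instance

-- ===== CLAIM (what is proved, stated in full; the proofs are below) =====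
def Claim_equal_szukaj_najwiecej_liter : Prop := ∀ (dane : List String), Dom_szukaj_najwiecej_liter dane → Pre_szukaj_najwiecej_liter dane → Spec_szukaj_najwiecej_liter dane (szukaj_najwiecej_liter dane)

-- ===== LEMMAS AND PROOFS =====

lemma pvMaksFrom_nil (m : Int) : pvMaksFrom m [] = m := rfl

lemma pvMaksFrom_cons (m : Int) (x : String) (xs : List String) :
    pvMaksFrom m (x :: xs) = pvMaksFrom (if pvDist x > m then pvDist x else m) xs := rfl

lemma le_pvMaksFrom (m : Int) (l : List String) : m ≤ pvMaksFrom m l := by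
  induction l generalizing m with
  | nil => simp [pvMaksFrom_nil]
  | cons x xs ih =>
      rw [pvMaksFrom_cons]
      split_ifs with h
      · exact le_of_lt (lt_of_lt_of_le h (ih _))
      · exact ih m

-- If nothing in l exceeds m, the one-pass fold keeps its state.
lemma fold_some_eq (l : List String) (w : String) (m : Int)
    (h : pvMaksFrom m l = m) : l.foldl pvStep (some (w, m)) = some (w, m) := by
  induction l generalizing w with
  | nil => rfl
  | cons x xs ih =>
      rw [pvMaksFrom_cons] at h
      by_cases hx : pvDist x > m
      · exfalso
        rw [if_pos hx] at h
        have := le_pvMaksFrom (pvDist x) xs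
        omega
      · rw [if_neg hx] at h
        simp only [List.foldl_cons, pvStep, if_neg hx]
        exact ih w h

-- If something in l exceeds m, the one-pass fold from state (w, m) lands on the
-- first element of l attaining the maximum pvMaksFrom m l.
lemma fold_some_gt (l : List String) (w : String) (m : Int)
    (h : pvMaksFrom m l > m) :
    l.foldl pvStep (some (w, m)) = pvFind (pvMaksFrom m l) l := by
  induction l generalizing w m with
  | nil => simp [pvMaksFrom_nil] at h
  | cons x xs ih =>
      rw [pvMaksFrom_cons] at h ⊢
      by_cases hx : pvDist x > m
      · rw [if_pos hx] at h ⊢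
        simp only [List.foldl_cons, pvStep, if_pos hx]
        by_cases hxs : pvMaksFrom (pvDist x) xs > pvDist x
        · rw [ih x (pvDist x) hxs]
          have hne : ¬ (pvDist x = pvMaksFrom (pvDist x) xs) := by omega
          simp only [pvFind, if_neg hne]
        · have heq : pvMaksFrom (pvDist x) xs = pvDist x := by
            have := le_pvMaksFrom (pvDist x) xs; omega
          rw [fold_some_eq xs x (pvDist x) heq, heq]
          simp [pvFind]
      · rw [if_neg hx] at h ⊢
        simp only [List.foldl_cons, pvStep, if_neg hx]
        rw [ih w m h]
        have hne : ¬ (pvDist x = pvMaksFrom m xs) := by omega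
        simp only [pvFind, if_neg hne]

lemma pvDist_nonneg (s : String) : 0 ≤ pvDist s := Int.natCast_nonneg _

-- ===== VERDICT (by name: the statement is the Claim_ definition above) =====
theorem szukaj_najwiecej_liter_spec : Claim_equal_szukaj_najwiecej_liter := by
  intro dane _ hpre
  unfold Spec_szukaj_najwiecej_liter szukaj_najwiecej_liter szukaj_najwiecej_liter_alt
  match dane with
  | [] => exact absurd rfl hpre
  | x :: xs =>
      have hd0 : 0 ≤ pvDist x := pvDist_nonneg x
      have hm : pvMaksFrom 0 (x :: xs) = pvMaksFrom (pvDist x) xs := by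
        rw [pvMaksFrom_cons]
        split_ifs with h
        · rfl
        · have : pvDist x = 0 := by omega
          rw [this]
      rw [hm]
      simp only [List.foldl_cons]
      have hstep : pvStep none x = some (x, pvDist x) := rfl
      rw [hstep]
      by_cases hgt : pvMaksFrom (pvDist x) xs > pvDist x
      · rw [fold_some_gt xs x (pvDist x) hgt]
        have hne : ¬ (pvDist x = pvMaksFrom (pvDist x) xs) := by omega
        simp only [pvFind, if_neg hne]
      · have heq : pvMaksFrom (pvDist x) xs = pvDist x := by
          have := le_pvMaksFrom (pvDist x) xs; omega
        rw [fold_some_eq xs x (pvDist x) heq, heq]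
        simp [pvFind]
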